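-- pv_equiv track=rewrite | github.com/Masoom-Wahid/Ds-Algos | another_icpc/asia_west_2023/fiendesh_five.py | solve
-- ===== SOURCE A (Python) =====
-- from functools import reduce
-- from math import gcd
--
-- def solve(s):
--     min_s = min(s)
--     diffs = [s_ - min_s for s_ in s]
--
--     gcd_val = reduce(gcd,diffs)
--
--     if gcd_val % 3 == 0:
--         return "YES"
--     else:
--         return "NO"
-- ===== SOURCE B (Python) =====
-- def solve(s):
--     m = min(s)
--     return "YES" if all((x - m) % 3 == 0 for x in s) else "NO"
-- ===== Notes on version B (the rewrite author's own statement) =====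
-- stated objective: simpler
-- what changed: Replaces the diffs-list plus reduce(gcd) pipeline with a single all(...) scan checking each (x - min) % 3 == 0, which is equivalent since 3 divides the gcd iff it divides every difference.
import Mathlib
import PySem

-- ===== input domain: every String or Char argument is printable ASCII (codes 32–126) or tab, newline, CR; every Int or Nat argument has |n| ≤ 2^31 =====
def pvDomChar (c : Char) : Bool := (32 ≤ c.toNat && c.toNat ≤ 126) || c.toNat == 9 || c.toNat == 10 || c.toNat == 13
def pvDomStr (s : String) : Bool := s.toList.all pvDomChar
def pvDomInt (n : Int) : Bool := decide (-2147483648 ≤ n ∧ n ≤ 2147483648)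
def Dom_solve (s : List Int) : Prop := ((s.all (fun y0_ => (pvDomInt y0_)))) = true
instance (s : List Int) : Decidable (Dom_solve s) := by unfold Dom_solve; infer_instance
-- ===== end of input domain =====

-- B replaces the diffs list and reduce(gcd) with one all(...) scan of (x - min) % 3 == 0 (simpler).
-- Pre_solve excludes the empty list, on which Python's min raises ValueError.


-- ===== PORT A =====
def solve (s : List Int) : String :=
  match PySem.List.min? s (fun x => x) with
  | none => ""            -- min([]) raises ValueError: outside Pre_solve
  | some min_s =>
    let diffs := s.map (fun s_ => s_ - min_s)
    match diffs with
    | [] => ""            -- reduce on empty raises TypeError: unreachable under Pre_solve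
    | d :: ds =>
      let gcd_val := ds.foldl (fun a b => (Int.gcd a b : Int)) d
      if gcd_val % 3 == 0 then "YES" else "NO"

-- ===== PORT B =====
def solve_alt (s : List Int) : String :=
  match PySem.List.min? s (fun x => x) with
  | none => ""
  | some m =>
    if s.all (fun x => (x - m) % 3 == 0) then "YES" else "NO"

-- ===== PRECONDITION & SPEC =====
-- Pre_solve: nonempty list (min of an empty list raises ValueError in Python).
def Pre_solve (s : List Int) : Prop := s ≠ []
instance (s : List Int) : Decidable (Pre_solve s) := by unfold Pre_solve; infer_instance
def pvWitness_solve : List Int := [4, 1, 7]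
def Spec_solve (s : List Int) (out : String) : Prop := out = solve_alt s
instance (s : List Int) (out : String) : Decidable (Spec_solve s out) := by unfold Spec_solve; infer_instance

-- ===== CLAIM (what is proved, stated in full; the proofs are below) =====
def Claim_equal_solve : Prop := ∀ (s : List Int), Dom_solve s → Pre_solve s → Spec_solve s (solve s)

-- ===== LEMMAS AND PROOFS =====

theorem dvd3_gcd (a b : Int) : (3:Int) ∣ (Int.gcd a b : Int) ↔ (3:Int) ∣ a ∧ (3:Int) ∣ b := by
  constructor
  · intro h
    exact ⟨h.trans (Int.gcd_dvd_left a b), h.trans (Int.gcd_dvd_right a b)⟩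
  · rintro ⟨h1, h2⟩
    exact_mod_cast Int.dvd_gcd h1 h2

theorem fold_gcd_dvd3 (d : Int) (ds : List Int) :
    (3:Int) ∣ (ds.foldl (fun a b => (Int.gcd a b : Int)) d) ↔
      (3:Int) ∣ d ∧ ∀ x ∈ ds, (3:Int) ∣ x := by
  induction ds generalizing d with
  | nil => simp
  | cons x t ih =>
    simp only [List.foldl_cons, ih, dvd3_gcd, List.mem_cons]
    constructor
    · rintro ⟨⟨hd, hx⟩, ht⟩
      exact ⟨hd, fun y hy => hy.elim (fun e => e ▸ hx) (ht y)⟩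
    · rintro ⟨hd, h⟩
      exact ⟨⟨hd, h x (Or.inl rfl)⟩, fun y hy => h y (Or.inr hy)⟩

theorem emod3_eq_dvd (n : Int) : (n % 3 == 0) = true ↔ (3:Int) ∣ n := by
  rw [beq_iff_eq, ← Int.dvd_iff_emod_eq_zero]

theorem solve_spec : Claim_equal_solve := by
  intro s _ hpre
  unfold Spec_solve solve solve_alt
  obtain ⟨a, t, rfl⟩ := List.exists_cons_of_ne_nil hpre
  rcases hm : PySem.List.min? (a :: t) (fun x => x) with _ | m
  · rw [PySem.List.min?_id_cons] at hm
  · simp only [List.map_cons]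
    have hA : ((a :: t).map (fun s_ => s_ - m)) = (a - m) :: t.map (fun s_ => s_ - m) := by simp
    -- A's condition: 3 ∣ fold gcd over diffs; B's: all diffs ≡ 0 mod 3
    have key : ((t.map (fun s_ => s_ - m)).foldl (fun a b => (Int.gcd a b : Int)) (a - m) % 3 == 0) =
        ((a :: t).all (fun x => (x - m) % 3 == 0)) := by
      rcases h1 : ((t.map (fun s_ => s_ - m)).foldl (fun a b => (Int.gcd a b : Int)) (a - m) % 3 == 0) with _ | _
      · rcases h2 : ((a :: t).all (fun x => (x - m) % 3 == 0)) with _ | _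
        · rfl
        · exfalso
          simp only [List.all_cons, Bool.and_eq_true, List.all_eq_true] at h2
          have : (3:Int) ∣ (a - m) ∧ ∀ x ∈ t.map (fun s_ => s_ - m), (3:Int) ∣ x := by
            refine ⟨(emod3_eq_dvd _).mp h2.1, ?_⟩
            intro x hx
            obtain ⟨y, hy, rfl⟩ := List.mem_map.mp hx
            exact (emod3_eq_dvd _).mp (h2.2 y hy)
          rw [← fold_gcd_dvd3, ← emod3_eq_dvd] at this
          simp [h1] at this
      · have := (fold_gcd_dvd3 _ _).mp ((emod3_eq_dvd _).mp h1)
        symm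
        simp only [List.all_cons, Bool.and_eq_true, List.all_eq_true]
        refine ⟨(emod3_eq_dvd _).mpr this.1, ?_⟩
        intro y hy
        exact (emod3_eq_dvd _).mpr (this.2 _ (List.mem_map_of_mem hy))
    simp only [key]
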